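-- pv_equiv track=rewrite | github.com/bionhen/Space-project | change_screen.py | recognise_modules
-- ===== SOURCE A (Python) =====
-- def recognise_modules(useless, mouse_x, mouse_y, click):
--     """
--     эта функция должна определять, запчасти какого рода надо показывать
--     :param useless: значение переменной draw_screen
--     :param mouse_x: горизонтальная координата точки, в которой произошел щелчок мыши
--     :param mouse_y: вертикальная координата точки, в которой произошел щелчок мыши
--     :param click: набор параметров, определяющих четность нажатия кнопки модуля
--     :return: click
--     """
--     if (625 <= mouse_x <= 775) and (75 <= mouse_y <= 125) and useless == "constructor":
--         click[0] = -1 * click[0]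
--         for i in 1, 2, 3, 4:
--             click[i] = -1
--     elif (625 <= mouse_x <= 775) and (150 <= mouse_y <= 200) and useless == "constructor":
--         click[1] = -1 * click[1]
--         for i in 0, 2, 3, 4:
--             click[i] = -1
--     elif (625 <= mouse_x <= 775) and (225 <= mouse_y <= 275) and useless == "constructor":
--         click[2] = -1 * click[2]
--         for i in 0, 1, 3, 4:
--             click[i] = -1
--     elif (625 <= mouse_x <= 775) and (300 <= mouse_y <= 350) and useless == "constructor":
--         click[3] = -1 * click[3]
--         for i in 0, 1, 2, 4:
--             click[i] = -1
--     elif (625 <= mouse_x <= 775) and (375 <= mouse_y <= 425) and useless == "constructor":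
--         click[4] = -1 * click[4]
--         for i in 0, 1, 2, 3:
--             click[i] = -1
--     else:
--         pass
--     return click
-- ===== SOURCE B (Python) =====
-- def recognise_modules(useless, mouse_x, mouse_y, click):
--     if useless == "constructor" and 625 <= mouse_x <= 775 and 75 <= mouse_y <= 425:
--         k = (mouse_y - 75) // 75
--         if mouse_y <= 125 + 75 * k:
--             for i in range(5):
--                 click[i] = -click[i] if i == k else -1
--     return click
-- ===== Notes on version B (the rewrite author's own statement) =====
-- stated objective: simpler
-- what changed: Replaces the five explicit coordinate-band branches (each with its own toggle index and hand-written 4-element reset loop) by one arithmetic band-index computation k=(mouse_y-75)//75 plus a single uniform loop over range(5).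
import Mathlib
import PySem

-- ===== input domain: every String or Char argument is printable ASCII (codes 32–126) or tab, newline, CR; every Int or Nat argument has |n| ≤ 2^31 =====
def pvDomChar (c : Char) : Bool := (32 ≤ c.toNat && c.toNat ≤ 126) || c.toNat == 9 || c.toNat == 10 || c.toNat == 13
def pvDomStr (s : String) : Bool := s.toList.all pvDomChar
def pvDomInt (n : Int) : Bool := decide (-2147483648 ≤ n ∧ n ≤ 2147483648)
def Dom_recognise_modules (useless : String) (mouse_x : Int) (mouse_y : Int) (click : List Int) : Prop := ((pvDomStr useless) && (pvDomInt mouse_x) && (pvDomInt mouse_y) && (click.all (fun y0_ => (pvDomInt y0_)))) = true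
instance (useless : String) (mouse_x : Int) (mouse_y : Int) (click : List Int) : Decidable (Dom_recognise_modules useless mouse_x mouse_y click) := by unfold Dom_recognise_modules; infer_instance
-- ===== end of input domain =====

-- B replaces A's five coordinate-band branches by one arithmetic band index plus a single
-- uniform toggle loop (objective: simpler). Both A and B mutate `click` in place in Python;
-- the equivalence proved here is about the returned list (which is that same list).

-- ===== PORT A =====
-- each branch: click[j] = -1 * click[j], then the four hand-written resets click[i] = -1
def recognise_modules (useless : String) (mouse_x : Int) (mouse_y : Int) (click : List Int) : List Int :=
  if 625 ≤ mouse_x ∧ mouse_x ≤ 775 ∧ 75 ≤ mouse_y ∧ mouse_y ≤ 125 ∧ useless = "constructor" then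
    let c := click.set 0 (-1 * (PySem.List.pyGet? click 0).getD 0)
    [1, 2, 3, 4].foldl (fun c i => c.set i (-1)) c
  else if 625 ≤ mouse_x ∧ mouse_x ≤ 775 ∧ 150 ≤ mouse_y ∧ mouse_y ≤ 200 ∧ useless = "constructor" then
    let c := click.set 1 (-1 * (PySem.List.pyGet? click 1).getD 0)
    [0, 2, 3, 4].foldl (fun c i => c.set i (-1)) c
  else if 625 ≤ mouse_x ∧ mouse_x ≤ 775 ∧ 225 ≤ mouse_y ∧ mouse_y ≤ 275 ∧ useless = "constructor" then
    let c := click.set 2 (-1 * (PySem.List.pyGet? click 2).getD 0)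
    [0, 1, 3, 4].foldl (fun c i => c.set i (-1)) c
  else if 625 ≤ mouse_x ∧ mouse_x ≤ 775 ∧ 300 ≤ mouse_y ∧ mouse_y ≤ 350 ∧ useless = "constructor" then
    let c := click.set 3 (-1 * (PySem.List.pyGet? click 3).getD 0)
    [0, 1, 2, 4].foldl (fun c i => c.set i (-1)) c
  else if 625 ≤ mouse_x ∧ mouse_x ≤ 775 ∧ 375 ≤ mouse_y ∧ mouse_y ≤ 425 ∧ useless = "constructor" then
    let c := click.set 4 (-1 * (PySem.List.pyGet? click 4).getD 0)
    [0, 1, 2, 3].foldl (fun c i => c.set i (-1)) c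
  else click

-- ===== PORT B =====
-- k = (mouse_y - 75) // 75; for i in range(5): click[i] = -click[i] if i == k else -1
def recognise_modules_alt (useless : String) (mouse_x : Int) (mouse_y : Int) (click : List Int) : List Int :=
  if useless = "constructor" ∧ 625 ≤ mouse_x ∧ mouse_x ≤ 775 ∧ 75 ≤ mouse_y ∧ mouse_y ≤ 425 then
    let k := PySem.Int.floordiv (mouse_y - 75) 75
    if mouse_y ≤ 125 + 75 * k then
      (PySem.List.pyRange 0 5 1).foldl
        (fun c i =>
          c.set i.toNat (if i = k then -((PySem.List.pyGet? c i.toNat).getD 0) else -1))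
        click
    else click
  else click

-- ===== PRECONDITION & SPEC =====
-- Pre_ excludes exactly the inputs on which A raises IndexError: a click inside one of the
-- five active bands (with useless = "constructor") while the list has fewer than 5 entries.
def Pre_recognise_modules (useless : String) (mouse_x : Int) (mouse_y : Int) (click : List Int) : Prop :=
  (useless = "constructor" ∧ 625 ≤ mouse_x ∧ mouse_x ≤ 775 ∧ 75 ≤ mouse_y ∧ mouse_y ≤ 425 ∧
    (mouse_y - 75) % 75 ≤ 50) → 5 ≤ click.length
instance (useless : String) (mouse_x : Int) (mouse_y : Int) (click : List Int) : Decidable (Pre_recognise_modules useless mouse_x mouse_y click) := by unfold Pre_recognise_modules; infer_instance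

def pvWitness_recognise_modules : String × Int × Int × List Int := ("constructor", 700, 160, [1, -1, 1, 1, 1])

def Spec_recognise_modules (useless : String) (mouse_x : Int) (mouse_y : Int) (click : List Int) (out : List Int) : Prop := out = recognise_modules_alt useless mouse_x mouse_y click
instance (useless : String) (mouse_x : Int) (mouse_y : Int) (click : List Int) (out : List Int) : Decidable (Spec_recognise_modules useless mouse_x mouse_y click out) := by unfold Spec_recognise_modules; infer_instance

-- ===== CLAIM (what is proved, stated in full; the proofs are below) =====
def Claim_equal_recognise_modules : Prop := ∀ (useless : String) (mouse_x : Int) (mouse_y : Int) (click : List Int), Dom_recognise_modules useless mouse_x mouse_y click → Pre_recognise_modules useless mouse_x mouse_y click → Spec_recognise_modules useless mouse_x mouse_y click (recognise_modules useless mouse_x mouse_y click)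

-- ===== LEMMAS AND PROOFS =====

-- ===== VERDICT (by name: the statement is the Claim_ definition above) =====
theorem recognise_modules_spec : Claim_equal_recognise_modules := by
  intro u x y c hdom hpre
  unfold Spec_recognise_modules
  have hfd : ∀ a : Int, PySem.Int.floordiv a 75 = a / 75 :=
    fun a => PySem.Int.floordiv_eq_ediv_of_pos (by norm_num)
  have hrange : PySem.List.pyRange 0 5 1 = [0, 1, 2, 3, 4] := by decide
  by_cases hc : u = "constructor"
  · subst hc
    by_cases hx : 625 ≤ x ∧ x ≤ 775
    · obtain ⟨hx1, hx2⟩ := hx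
      by_cases hband : 75 ≤ y ∧ y ≤ 425 ∧ (y - 75) % 75 ≤ 50
      · have hlen : 5 ≤ c.length := hpre ⟨rfl, hx1, hx2, hband.1, hband.2.1, hband.2.2⟩
        obtain ⟨c0, c1, c2, c3, c4, rest, rfl⟩ :
            ∃ c0 c1 c2 c3 c4 rest, c = c0 :: c1 :: c2 :: c3 :: c4 :: rest := by
          match c, hlen with
          | c0 :: c1 :: c2 :: c3 :: c4 :: rest, _ => exact ⟨c0, c1, c2, c3, c4, rest, rfl⟩
        have h5 : (y - 75) / 75 = 0 ∨ (y - 75) / 75 = 1 ∨ (y - 75) / 75 = 2 ∨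
            (y - 75) / 75 = 3 ∨ (y - 75) / 75 = 4 := by omega
        simp only [recognise_modules, recognise_modules_alt, hfd, hrange,
          true_and, and_true]
        rcases h5 with hj | hj | hj | hj | hj <;> rw [hj] <;>
          [skip; rw [if_neg (by omega)]; rw [if_neg (by omega), if_neg (by omega)];
           rw [if_neg (by omega), if_neg (by omega), if_neg (by omega)];
           rw [if_neg (by omega), if_neg (by omega), if_neg (by omega), if_neg (by omega)]] <;>
          rw [if_pos (by omega), if_pos (by omega), if_pos (by omega)] <;>
          simp [PySem.List.pyGet?_of_nonneg, List.foldl, List.set]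
      · simp only [recognise_modules, recognise_modules_alt, hfd, hrange,
          true_and, and_true]
        rw [if_neg (by omega), if_neg (by omega), if_neg (by omega), if_neg (by omega),
            if_neg (by omega)]
        by_cases hg : 75 ≤ y ∧ y ≤ 425
        · rw [if_pos ⟨hx1, hx2, hg.1, hg.2⟩, if_neg (by omega)]
        · rw [if_neg (by omega)]
    · simp only [recognise_modules, recognise_modules_alt,
        true_and, and_true]
      rw [if_neg (by omega), if_neg (by omega), if_neg (by omega), if_neg (by omega),
          if_neg (by omega), if_neg (by omega)]
  · simp [recognise_modules, recognise_modules_alt, hc]
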